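-- pv_equiv track=rewrite | github.com/SprocketLab/slop-code-bench | src/slop_code/visualization/graph_utils.py | grid_for_panels
-- ===== SOURCE A (Python) =====
-- import math
--
-- def grid_for_panels(
--     panel_count: int, max_cols: int
-- ) -> tuple[int, int, list[tuple[int, int]]]:
--     if panel_count <= 0:
--         return 0, 0, []
--     cols = max(1, min(max_cols, panel_count))
--     rows = math.ceil(panel_count / cols)
--     positions = [(i // cols + 1, i % cols + 1) for i in range(panel_count)]
--     return rows, cols, positions
-- ===== SOURCE B (Python) =====
-- def grid_for_panels(panel_count, max_cols):
--     if panel_count <= 0: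
--         return 0, 0, []
--     cols = panel_count if panel_count < max_cols else max_cols
--     if cols < 1:
--         cols = 1
--     positions = []
--     r, c = 1, 0
--     for _ in range(panel_count):
--         c += 1
--         if c > cols:
--             r, c = r + 1, 1
--         positions.append((r, c))
--     return r, cols, positions
-- ===== Notes on version B (the rewrite author's own statement) =====
-- stated objective: alternative
-- what changed: A computes cols via max/min, rows via float math.ceil, and every position independently by divmod over a flat index range; B runs a single cursor loop that advances a (row, col) coordinate pair panel by panel (wrapping at cols) with no division at all, and reads rows off as the final cursor row.
import Mathlib
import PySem

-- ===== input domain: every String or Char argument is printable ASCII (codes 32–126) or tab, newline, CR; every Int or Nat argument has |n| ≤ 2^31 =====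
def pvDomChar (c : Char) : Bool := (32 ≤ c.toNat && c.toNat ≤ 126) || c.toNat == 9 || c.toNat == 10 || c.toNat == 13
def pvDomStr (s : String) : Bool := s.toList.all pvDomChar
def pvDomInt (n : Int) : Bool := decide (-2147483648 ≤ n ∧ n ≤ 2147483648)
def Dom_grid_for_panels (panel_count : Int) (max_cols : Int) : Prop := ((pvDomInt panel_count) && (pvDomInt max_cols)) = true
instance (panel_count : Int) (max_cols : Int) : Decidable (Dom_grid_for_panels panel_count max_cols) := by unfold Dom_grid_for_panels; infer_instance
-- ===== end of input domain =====

-- B replaces A's per-index divmod comprehension and float math.ceil by one cursor loop that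
-- advances a (row, col) pair panel by panel, wrapping at cols; rows is the final cursor row.
-- Objective: alternative (division-free single pass), same asymptotic cost.

-- ===== PORT A =====
def grid_for_panels (panel_count : Int) (max_cols : Int) : Int × Int × (List (Int × Int)) :=
  if panel_count ≤ 0 then (0, 0, []) else
    let cols := max 1 (min max_cols panel_count)
    -- math.ceil(panel_count / cols): ported as the integer ceiling -((-panel_count) // cols),
    -- exact here because on Dom (|panel_count| ≤ 2^31) the float quotient cannot round across
    -- an integer boundary.
    let rows := -(PySem.Int.floordiv (-panel_count) cols)
    let positions := (PySem.List.pyRange 0 panel_count).map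
      (fun i => (PySem.Int.floordiv i cols + 1, PySem.Int.mod i cols + 1))
    (rows, cols, positions)

-- ===== PORT B =====
-- Loop body of Source B's for-loop (the loop variable is ignored); state = (positions, r, c).
def altStep (cols : Int) (st : List (Int × Int) × Int × Int) (_ : Int) :
    List (Int × Int) × Int × Int :=
  let c := st.2.2 + 1
  let rc := if c > cols then (st.2.1 + 1, (1 : Int)) else (st.2.1, c)
  (st.1 ++ [rc], rc.1, rc.2)

def grid_for_panels_alt (panel_count : Int) (max_cols : Int) : Int × Int × (List (Int × Int)) :=
  if panel_count ≤ 0 then (0, 0, []) else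
    let cols0 := if panel_count < max_cols then panel_count else max_cols
    let cols := if cols0 < 1 then 1 else cols0
    let st := (PySem.List.pyRange 0 panel_count).foldl (altStep cols) ([], 1, 0)
    (st.2.1, cols, st.1)

-- ===== PRECONDITION & SPEC =====
def Spec_grid_for_panels (panel_count : Int) (max_cols : Int) (out : Int × Int × (List (Int × Int))) : Prop := out = grid_for_panels_alt panel_count max_cols
instance (panel_count : Int) (max_cols : Int) (out : Int × Int × (List (Int × Int))) : Decidable (Spec_grid_for_panels panel_count max_cols out) := by unfold Spec_grid_for_panels; infer_instance

-- ===== CLAIM (what is proved, stated in full; the proofs are below) =====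
def Claim_equal_grid_for_panels : Prop := ∀ (panel_count : Int) (max_cols : Int), Dom_grid_for_panels panel_count max_cols → Spec_grid_for_panels panel_count max_cols (grid_for_panels panel_count max_cols)

-- ===== LEMMAS AND PROOFS =====

-- Invariant of B's cursor loop: after P steps the accumulator holds exactly A's divmod
-- positions for indices 0..P-1, and the cursor sits at the divmod coordinates of index P-1.
theorem altLoop_inv (C : Nat) (hC : 0 < C) (P : Nat) :
    (List.range P).foldl (fun st (k : Nat) => altStep (C : Int) st (k : Int)) ([], 1, 0)
    = ((List.range P).map (fun i : Nat => (((i / C : Nat) : Int) + 1, ((i % C : Nat) : Int) + 1)),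
       if P = 0 then ((1 : Int), (0 : Int))
       else ((((P - 1) / C : Nat) : Int) + 1, (((P - 1) % C : Nat) : Int) + 1)) := by
  induction P with
  | zero => simp
  | succ P ih =>
    rw [List.range_succ, List.foldl_append, List.map_append, ih]
    rcases Nat.eq_zero_or_pos P with h0 | hP
    · subst h0
      simp [altStep]
      omega
    · set q := (P - 1) / C with hq
      set m := (P - 1) % C with hm
      have hdm : C * q + m = P - 1 := Nat.div_add_mod (P - 1) C
      have hmlt : m < C := Nat.mod_lt (P - 1) hC
      simp only [List.foldl_cons, List.foldl_nil, altStep,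
        if_neg (by omega : ¬ P = 0), if_neg (by omega : ¬ P + 1 = 0), Nat.add_sub_cancel]
      by_cases hw : m + 1 = C
      · have hPC : P = C * (q + 1) := by rw [Nat.mul_add, Nat.mul_one]; omega
        rw [if_pos (by omega : ((m : Nat) : Int) + 1 + 1 > (C : Int))]
        have hdiv : P / C = q + 1 := by rw [hPC, Nat.mul_div_cancel_left _ hC]
        have hmod : P % C = 0 := by rw [hPC, Nat.mul_mod_right]
        simp [hdiv, hmod]
        omega
      · have hlt : m + 1 < C := by omega
        rw [if_neg (by omega : ¬ ((m : Nat) : Int) + 1 + 1 > (C : Int))]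
        have hPC : P = C * q + (m + 1) := by omega
        have hdiv : P / C = q := by
          rw [hPC, Nat.mul_add_div hC, Nat.div_eq_of_lt hlt, Nat.add_zero]
        have hmod : P % C = m + 1 := by
          rw [hPC, Nat.mul_add_mod, Nat.mod_eq_of_lt hlt]
        simp [hdiv, hmod]
        omega

theorem cols_agree (pc mc : Int) :
    (if (if pc < mc then pc else mc) < 1 then 1 else (if pc < mc then pc else mc))
      = max 1 (min mc pc) := by
  split_ifs <;> omega

theorem positions_eq (pc mc : Int) (hpc : 0 < pc) :
    grid_for_panels pc mc = grid_for_panels_alt pc mc := by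
  unfold grid_for_panels grid_for_panels_alt
  rw [if_neg (by omega), if_neg (by omega)]
  dsimp only
  rw [cols_agree pc mc]
  set cols := max 1 (min mc pc) with hcols
  have hC0 : 0 < cols := by omega
  obtain ⟨C, hCc⟩ : ∃ C : Nat, cols = (C : Int) := ⟨cols.toNat, by omega⟩
  obtain ⟨P, hPc⟩ : ∃ P : Nat, pc = (P : Int) := ⟨pc.toNat, by omega⟩
  have hCpos : 0 < C := by omega
  have hPpos : 0 < P := by omega
  rw [hPc, PySem.List.pyRange_zero_natCast, List.foldl_map, List.map_map, hCc,
    altLoop_inv C hCpos P, if_neg (by omega : ¬ P = 0)]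
  set q := (P - 1) / C with hq
  set m := (P - 1) % C with hm
  have hdm : C * q + m = P - 1 := Nat.div_add_mod (P - 1) C
  have hmlt : m < C := Nat.mod_lt (P - 1) hCpos
  simp only [Prod.mk.injEq]
  refine ⟨?_, trivial, ?_⟩
  · rw [PySem.Int.neg_floordiv_neg_eq_iff_of_pos (by omega : (0:Int) < (C:Int))]
    have hlow : q * C < P := by rw [Nat.mul_comm]; omega
    have hup : P ≤ (q + 1) * C := by rw [Nat.add_mul, Nat.one_mul, Nat.mul_comm]; omega
    constructor
    · have h1 : ((q : Int) + 1 - 1) = (q : Int) := by ring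
      rw [h1]; exact_mod_cast hlow
    · exact_mod_cast hup
  · apply List.map_congr_left
    intro i _
    simp [PySem.Int.floordiv_natCast, PySem.Int.mod_natCast]

theorem grid_for_panels_spec : Claim_equal_grid_for_panels := by
  intro pc mc _
  unfold Spec_grid_for_panels
  by_cases h : pc ≤ 0
  · simp [grid_for_panels, grid_for_panels_alt, h]
  · exact positions_eq pc mc (by omega)
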